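-- pv_equiv track=rewrite | github.com/endlessor/Sadbar-Python-Django | client/views.py | __convert_target_list_order_by_fields
-- ===== SOURCE A (Python) =====
-- def __convert_target_list_order_by_fields(order_by):
--     """
--     This function converts front-end-template-derived sorting strings, such as:
--         'nickname'
--         'email'
--         'password'
--     into strings consumable by TargetList's queryset.order_by, such as:
--         'nickname'
--         'target__email'
--         'target__vector_email__result_event__password'
--     """
--
--     order_by = order_by.split(',')
--
--     tl_fields = ['nickname', '-nickname']
--     target_fields = ['email', 'firstname', 'lastname']
--     target_fields_ = ['-email', '-firstname', '-lastname']
--     result_event_fields = ['event_type', 'timestamp', 'userAgent', 'ip',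
--                            'login', 'password', 'raw_data']
--     result_event_fields_ = ['-event_type', '-timestamp',
--                             '-userAgent', '-ip', '-login', '-password',
--                             '-raw_data']
--
--     order_by_target_list = [i for i in order_by if i in tl_fields]
--     order_by_target = ['target__%s' % i for i in order_by
--                        if i in target_fields]
--     order_by_target_ = ['-target__%s' % i[1:] for i in order_by
--                         if i in target_fields_]
--     order_by_result_event = ['target__vector_email__result_event__%s' % i
--                              for i in order_by if i in result_event_fields]
--     order_by_result_event_ = ['-target__vector_email__result_event__%s' % i[1:]
--                               for i in order_by if i in result_event_fields_]
--
--     if order_by_target: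
--         order_by_target_list.extend(order_by_target)
--     if order_by_target_:
--         order_by_target_list.extend(order_by_target_)
--     if order_by_result_event:
--         order_by_target_list.extend(order_by_result_event)
--     if order_by_result_event_:
--         order_by_target_list.extend(order_by_result_event_)
--     return order_by_target_list
-- ===== SOURCE B (Python) =====
-- _FIELD_TABLE = {'nickname': (0, 'nickname'), '-nickname': (0, '-nickname')}
-- for _f in ('email', 'firstname', 'lastname'):
--     _FIELD_TABLE[_f] = (1, 'target__%s' % _f)
--     _FIELD_TABLE['-' + _f] = (2, '-target__%s' % _f)
-- for _f in ('event_type', 'timestamp', 'userAgent', 'ip', 'login', 'password', 'raw_data'):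
--     _FIELD_TABLE[_f] = (3, 'target__vector_email__result_event__%s' % _f)
--     _FIELD_TABLE['-' + _f] = (4, '-target__vector_email__result_event__%s' % _f)
--
--
-- def __convert_target_list_order_by_fields(order_by):
--     buckets = ([], [], [], [], [])
--     for token in order_by.split(','):
--         entry = _FIELD_TABLE.get(token)
--         if entry is not None:
--             buckets[entry[0]].append(entry[1])
--     return buckets[0] + buckets[1] + buckets[2] + buckets[3] + buckets[4]
-- ===== Notes on version B (the rewrite author's own statement) =====
-- stated objective: simpler
-- what changed: Replaces A's five separate filtering passes over the split token list (plus conditional extends) by one precomputed token->(bucket,path) lookup table and a single pass that appends each mapped token to its bucket, concatenating the five buckets at the end.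
import Mathlib
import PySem

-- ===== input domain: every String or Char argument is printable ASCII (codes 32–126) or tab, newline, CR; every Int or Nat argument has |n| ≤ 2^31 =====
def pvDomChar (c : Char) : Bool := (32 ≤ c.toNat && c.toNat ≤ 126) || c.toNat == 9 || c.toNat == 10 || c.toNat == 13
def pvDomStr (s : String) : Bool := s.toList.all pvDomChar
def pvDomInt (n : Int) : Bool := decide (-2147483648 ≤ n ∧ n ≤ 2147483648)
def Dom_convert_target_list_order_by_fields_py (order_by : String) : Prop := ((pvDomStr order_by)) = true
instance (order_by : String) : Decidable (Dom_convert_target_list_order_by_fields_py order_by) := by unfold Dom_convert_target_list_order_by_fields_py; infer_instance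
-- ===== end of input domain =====

-- B replaces A's five separate filtering passes over the split token list by one dict table lookup pass
-- into five buckets concatenated at the end (objective: simpler single-pass decomposition; same asymptotic cost).

-- ===== PORT A =====
-- order_by.split(',') with the non-empty separator ',' (exact: PySem.Chars.splitOn is s.split(sep) for sep ≠ "")
def pvSplitComma (s : String) : List String :=
  (PySem.Chars.splitOn s.toList [',']).map String.ofList

def convert_target_list_order_by_fields_py (order_by : String) : List String :=
  let ob := pvSplitComma order_by
  let tl_fields : List String := ["nickname", "-nickname"]
  let target_fields : List String := ["email", "firstname", "lastname"]
  let target_fields_ : List String := ["-email", "-firstname", "-lastname"]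
  let result_event_fields : List String :=
    ["event_type", "timestamp", "userAgent", "ip", "login", "password", "raw_data"]
  let result_event_fields_ : List String :=
    ["-event_type", "-timestamp", "-userAgent", "-ip", "-login", "-password", "-raw_data"]
  let order_by_target_list := ob.filter (fun i => tl_fields.contains i)
  let order_by_target :=
    (ob.filter (fun i => target_fields.contains i)).map
      (fun i => PySem.Str.join "" ["target__", i])
  let order_by_target_ :=
    (ob.filter (fun i => target_fields_.contains i)).map
      (fun i => PySem.Str.join "" ["-target__", PySem.Str.slice i (some 1) none])
  let order_by_result_event :=
    (ob.filter (fun i => result_event_fields.contains i)).map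
      (fun i => PySem.Str.join "" ["target__vector_email__result_event__", i])
  let order_by_result_event_ :=
    (ob.filter (fun i => result_event_fields_.contains i)).map
      (fun i => PySem.Str.join "" ["-target__vector_email__result_event__", PySem.Str.slice i (some 1) none])
  let r1 := if order_by_target ≠ [] then order_by_target_list ++ order_by_target else order_by_target_list
  let r2 := if order_by_target_ ≠ [] then r1 ++ order_by_target_ else r1
  let r3 := if order_by_result_event ≠ [] then r2 ++ order_by_result_event else r2
  let r4 := if order_by_result_event_ ≠ [] then r3 ++ order_by_result_event_ else r3
  r4

-- ===== PORT B =====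
-- the module-level _FIELD_TABLE dict of Source B (values written as the literals the % formatting produces at load time)
def pvFieldTable : PySem.Dict String (Nat × String) := PySem.Dict.ofList
  [ ("nickname", (0, "nickname")), ("-nickname", (0, "-nickname"))
  , ("email", (1, "target__email")), ("-email", (2, "-target__email"))
  , ("firstname", (1, "target__firstname")), ("-firstname", (2, "-target__firstname"))
  , ("lastname", (1, "target__lastname")), ("-lastname", (2, "-target__lastname"))
  , ("event_type", (3, "target__vector_email__result_event__event_type")), ("-event_type", (4, "-target__vector_email__result_event__event_type"))
  , ("timestamp", (3, "target__vector_email__result_event__timestamp")), ("-timestamp", (4, "-target__vector_email__result_event__timestamp"))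
  , ("userAgent", (3, "target__vector_email__result_event__userAgent")), ("-userAgent", (4, "-target__vector_email__result_event__userAgent"))
  , ("ip", (3, "target__vector_email__result_event__ip")), ("-ip", (4, "-target__vector_email__result_event__ip"))
  , ("login", (3, "target__vector_email__result_event__login")), ("-login", (4, "-target__vector_email__result_event__login"))
  , ("password", (3, "target__vector_email__result_event__password")), ("-password", (4, "-target__vector_email__result_event__password"))
  , ("raw_data", (3, "target__vector_email__result_event__raw_data")), ("-raw_data", (4, "-target__vector_email__result_event__raw_data")) ]

-- the five buckets, as the loop state
abbrev pvBuckets := List String × List String × List String × List String × List String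

-- one loop iteration: look the token up, append the mapped string to its bucket (skip unknown tokens)
def pvStep (b : pvBuckets) (tok : String) : pvBuckets :=
  match pvFieldTable.get? tok with
  | none => b
  | some (k, s) =>
      if k = 0 then (b.1 ++ [s], b.2.1, b.2.2.1, b.2.2.2.1, b.2.2.2.2)
      else if k = 1 then (b.1, b.2.1 ++ [s], b.2.2.1, b.2.2.2.1, b.2.2.2.2)
      else if k = 2 then (b.1, b.2.1, b.2.2.1 ++ [s], b.2.2.2.1, b.2.2.2.2)
      else if k = 3 then (b.1, b.2.1, b.2.2.1, b.2.2.2.1 ++ [s], b.2.2.2.2)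
      else (b.1, b.2.1, b.2.2.1, b.2.2.2.1, b.2.2.2.2 ++ [s])

def convert_target_list_order_by_fields_py_alt (order_by : String) : List String :=
  let buckets := (pvSplitComma order_by).foldl pvStep ([], [], [], [], [])
  buckets.1 ++ buckets.2.1 ++ buckets.2.2.1 ++ buckets.2.2.2.1 ++ buckets.2.2.2.2

-- ===== PRECONDITION & SPEC =====
def Spec_convert_target_list_order_by_fields_py (order_by : String) (out : List String) : Prop := out = convert_target_list_order_by_fields_py_alt order_by
instance (order_by : String) (out : List String) : Decidable (Spec_convert_target_list_order_by_fields_py order_by out) := by unfold Spec_convert_target_list_order_by_fields_py; infer_instance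

-- ===== CLAIM (what is proved, stated in full; the proofs are below) =====
def Claim_equal_convert_target_list_order_by_fields_py : Prop := ∀ (order_by : String), Dom_convert_target_list_order_by_fields_py order_by → Spec_convert_target_list_order_by_fields_py order_by (convert_target_list_order_by_fields_py order_by)

-- ===== LEMMAS AND PROOFS =====

-- per-category contributions of a single token, phrased with A's string constructors
def pvH0 (t : String) : List String :=
  if (["nickname", "-nickname"] : List String).contains t then [t] else []
def pvH1 (t : String) : List String :=
  if (["email", "firstname", "lastname"] : List String).contains t
  then [PySem.Str.join "" ["target__", t]] else []
def pvH2 (t : String) : List String :=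
  if (["-email", "-firstname", "-lastname"] : List String).contains t
  then [PySem.Str.join "" ["-target__", PySem.Str.slice t (some 1) none]] else []
def pvH3 (t : String) : List String :=
  if (["event_type", "timestamp", "userAgent", "ip", "login", "password", "raw_data"] : List String).contains t
  then [PySem.Str.join "" ["target__vector_email__result_event__", t]] else []
def pvH4 (t : String) : List String :=
  if (["-event_type", "-timestamp", "-userAgent", "-ip", "-login", "-password", "-raw_data"] : List String).contains t
  then [PySem.Str.join "" ["-target__vector_email__result_event__", PySem.Str.slice t (some 1) none]] else []

lemma pvStep_eq (b : pvBuckets) (t : String) :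
    pvStep b t = (b.1 ++ pvH0 t, b.2.1 ++ pvH1 t, b.2.2.1 ++ pvH2 t,
                  b.2.2.2.1 ++ pvH3 t, b.2.2.2.2 ++ pvH4 t) := by
  by_cases h0 : t = "nickname"
  · subst h0
    simp [pvStep, show pvFieldTable.get? "nickname" = some (0, "nickname") from by decide,
          show pvH0 "nickname" = ["nickname"] from by decide,
          show pvH1 "nickname" = [] from by decide,
          show pvH2 "nickname" = [] from by decide,
          show pvH3 "nickname" = [] from by decide,
          show pvH4 "nickname" = [] from by decide]
  by_cases h1 : t = "-nickname"
  · subst h1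
    simp [pvStep, show pvFieldTable.get? "-nickname" = some (0, "-nickname") from by decide,
          show pvH0 "-nickname" = ["-nickname"] from by decide,
          show pvH1 "-nickname" = [] from by decide,
          show pvH2 "-nickname" = [] from by decide,
          show pvH3 "-nickname" = [] from by decide,
          show pvH4 "-nickname" = [] from by decide]
  by_cases h2 : t = "email"
  · subst h2
    simp [pvStep, show pvFieldTable.get? "email" = some (1, "target__email") from by decide,
          show pvH0 "email" = [] from by decide,
          show pvH1 "email" = ["target__email"] from by decide,
          show pvH2 "email" = [] from by decide,
          show pvH3 "email" = [] from by decide,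
          show pvH4 "email" = [] from by decide]
  by_cases h3 : t = "-email"
  · subst h3
    simp [pvStep, show pvFieldTable.get? "-email" = some (2, "-target__email") from by decide,
          show pvH0 "-email" = [] from by decide,
          show pvH1 "-email" = [] from by decide,
          show pvH2 "-email" = ["-target__email"] from by decide,
          show pvH3 "-email" = [] from by decide,
          show pvH4 "-email" = [] from by decide]
  by_cases h4 : t = "firstname"
  · subst h4
    simp [pvStep, show pvFieldTable.get? "firstname" = some (1, "target__firstname") from by decide,
          show pvH0 "firstname" = [] from by decide,
          show pvH1 "firstname" = ["target__firstname"] from by decide,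
          show pvH2 "firstname" = [] from by decide,
          show pvH3 "firstname" = [] from by decide,
          show pvH4 "firstname" = [] from by decide]
  by_cases h5 : t = "-firstname"
  · subst h5
    simp [pvStep, show pvFieldTable.get? "-firstname" = some (2, "-target__firstname") from by decide,
          show pvH0 "-firstname" = [] from by decide,
          show pvH1 "-firstname" = [] from by decide,
          show pvH2 "-firstname" = ["-target__firstname"] from by decide,
          show pvH3 "-firstname" = [] from by decide,
          show pvH4 "-firstname" = [] from by decide]
  by_cases h6 : t = "lastname"
  · subst h6
    simp [pvStep, show pvFieldTable.get? "lastname" = some (1, "target__lastname") from by decide,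
          show pvH0 "lastname" = [] from by decide,
          show pvH1 "lastname" = ["target__lastname"] from by decide,
          show pvH2 "lastname" = [] from by decide,
          show pvH3 "lastname" = [] from by decide,
          show pvH4 "lastname" = [] from by decide]
  by_cases h7 : t = "-lastname"
  · subst h7
    simp [pvStep, show pvFieldTable.get? "-lastname" = some (2, "-target__lastname") from by decide,
          show pvH0 "-lastname" = [] from by decide,
          show pvH1 "-lastname" = [] from by decide,
          show pvH2 "-lastname" = ["-target__lastname"] from by decide,
          show pvH3 "-lastname" = [] from by decide,
          show pvH4 "-lastname" = [] from by decide]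
  by_cases h8 : t = "event_type"
  · subst h8
    simp [pvStep, show pvFieldTable.get? "event_type" = some (3, "target__vector_email__result_event__event_type") from by decide,
          show pvH0 "event_type" = [] from by decide,
          show pvH1 "event_type" = [] from by decide,
          show pvH2 "event_type" = [] from by decide,
          show pvH3 "event_type" = ["target__vector_email__result_event__event_type"] from by decide,
          show pvH4 "event_type" = [] from by decide]
  by_cases h9 : t = "-event_type"
  · subst h9
    simp [pvStep, show pvFieldTable.get? "-event_type" = some (4, "-target__vector_email__result_event__event_type") from by decide,
          show pvH0 "-event_type" = [] from by decide,
          show pvH1 "-event_type" = [] from by decide,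
          show pvH2 "-event_type" = [] from by decide,
          show pvH3 "-event_type" = [] from by decide,
          show pvH4 "-event_type" = ["-target__vector_email__result_event__event_type"] from by decide]
  by_cases h10 : t = "timestamp"
  · subst h10
    simp [pvStep, show pvFieldTable.get? "timestamp" = some (3, "target__vector_email__result_event__timestamp") from by decide,
          show pvH0 "timestamp" = [] from by decide,
          show pvH1 "timestamp" = [] from by decide,
          show pvH2 "timestamp" = [] from by decide,
          show pvH3 "timestamp" = ["target__vector_email__result_event__timestamp"] from by decide,
          show pvH4 "timestamp" = [] from by decide]
  by_cases h11 : t = "-timestamp"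
  · subst h11
    simp [pvStep, show pvFieldTable.get? "-timestamp" = some (4, "-target__vector_email__result_event__timestamp") from by decide,
          show pvH0 "-timestamp" = [] from by decide,
          show pvH1 "-timestamp" = [] from by decide,
          show pvH2 "-timestamp" = [] from by decide,
          show pvH3 "-timestamp" = [] from by decide,
          show pvH4 "-timestamp" = ["-target__vector_email__result_event__timestamp"] from by decide]
  by_cases h12 : t = "userAgent"
  · subst h12
    simp [pvStep, show pvFieldTable.get? "userAgent" = some (3, "target__vector_email__result_event__userAgent") from by decide,
          show pvH0 "userAgent" = [] from by decide,
          show pvH1 "userAgent" = [] from by decide,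
          show pvH2 "userAgent" = [] from by decide,
          show pvH3 "userAgent" = ["target__vector_email__result_event__userAgent"] from by decide,
          show pvH4 "userAgent" = [] from by decide]
  by_cases h13 : t = "-userAgent"
  · subst h13
    simp [pvStep, show pvFieldTable.get? "-userAgent" = some (4, "-target__vector_email__result_event__userAgent") from by decide,
          show pvH0 "-userAgent" = [] from by decide,
          show pvH1 "-userAgent" = [] from by decide,
          show pvH2 "-userAgent" = [] from by decide,
          show pvH3 "-userAgent" = [] from by decide,
          show pvH4 "-userAgent" = ["-target__vector_email__result_event__userAgent"] from by decide]
  by_cases h14 : t = "ip"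
  · subst h14
    simp [pvStep, show pvFieldTable.get? "ip" = some (3, "target__vector_email__result_event__ip") from by decide,
          show pvH0 "ip" = [] from by decide,
          show pvH1 "ip" = [] from by decide,
          show pvH2 "ip" = [] from by decide,
          show pvH3 "ip" = ["target__vector_email__result_event__ip"] from by decide,
          show pvH4 "ip" = [] from by decide]
  by_cases h15 : t = "-ip"
  · subst h15
    simp [pvStep, show pvFieldTable.get? "-ip" = some (4, "-target__vector_email__result_event__ip") from by decide,
          show pvH0 "-ip" = [] from by decide,
          show pvH1 "-ip" = [] from by decide,
          show pvH2 "-ip" = [] from by decide,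
          show pvH3 "-ip" = [] from by decide,
          show pvH4 "-ip" = ["-target__vector_email__result_event__ip"] from by decide]
  by_cases h16 : t = "login"
  · subst h16
    simp [pvStep, show pvFieldTable.get? "login" = some (3, "target__vector_email__result_event__login") from by decide,
          show pvH0 "login" = [] from by decide,
          show pvH1 "login" = [] from by decide,
          show pvH2 "login" = [] from by decide,
          show pvH3 "login" = ["target__vector_email__result_event__login"] from by decide,
          show pvH4 "login" = [] from by decide]
  by_cases h17 : t = "-login"
  · subst h17
    simp [pvStep, show pvFieldTable.get? "-login" = some (4, "-target__vector_email__result_event__login") from by decide,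
          show pvH0 "-login" = [] from by decide,
          show pvH1 "-login" = [] from by decide,
          show pvH2 "-login" = [] from by decide,
          show pvH3 "-login" = [] from by decide,
          show pvH4 "-login" = ["-target__vector_email__result_event__login"] from by decide]
  by_cases h18 : t = "password"
  · subst h18
    simp [pvStep, show pvFieldTable.get? "password" = some (3, "target__vector_email__result_event__password") from by decide,
          show pvH0 "password" = [] from by decide,
          show pvH1 "password" = [] from by decide,
          show pvH2 "password" = [] from by decide,
          show pvH3 "password" = ["target__vector_email__result_event__password"] from by decide,
          show pvH4 "password" = [] from by decide]
  by_cases h19 : t = "-password"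
  · subst h19
    simp [pvStep, show pvFieldTable.get? "-password" = some (4, "-target__vector_email__result_event__password") from by decide,
          show pvH0 "-password" = [] from by decide,
          show pvH1 "-password" = [] from by decide,
          show pvH2 "-password" = [] from by decide,
          show pvH3 "-password" = [] from by decide,
          show pvH4 "-password" = ["-target__vector_email__result_event__password"] from by decide]
  by_cases h20 : t = "raw_data"
  · subst h20
    simp [pvStep, show pvFieldTable.get? "raw_data" = some (3, "target__vector_email__result_event__raw_data") from by decide,
          show pvH0 "raw_data" = [] from by decide,
          show pvH1 "raw_data" = [] from by decide,
          show pvH2 "raw_data" = [] from by decide,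
          show pvH3 "raw_data" = ["target__vector_email__result_event__raw_data"] from by decide,
          show pvH4 "raw_data" = [] from by decide]
  by_cases h21 : t = "-raw_data"
  · subst h21
    simp [pvStep, show pvFieldTable.get? "-raw_data" = some (4, "-target__vector_email__result_event__raw_data") from by decide,
          show pvH0 "-raw_data" = [] from by decide,
          show pvH1 "-raw_data" = [] from by decide,
          show pvH2 "-raw_data" = [] from by decide,
          show pvH3 "-raw_data" = [] from by decide,
          show pvH4 "-raw_data" = ["-target__vector_email__result_event__raw_data"] from by decide]
  -- unknown token: the table lookup misses and every membership test is false
  have hmk : pvFieldTable = PySem.Dict.mk [("nickname", (0, "nickname")), ("-nickname", (0, "-nickname")), ("email", (1, "target__email")), ("-email", (2, "-target__email")), ("firstname", (1, "target__firstname")), ("-firstname", (2, "-target__firstname")), ("lastname", (1, "target__lastname")), ("-lastname", (2, "-target__lastname")), ("event_type", (3, "target__vector_email__result_event__event_type")), ("-event_type", (4, "-target__vector_email__result_event__event_type")), ("timestamp", (3, "target__vector_email__result_event__timestamp")), ("-timestamp", (4, "-target__vector_email__result_event__timestamp")), ("userAgent", (3, "target__vector_email__result_event__userAgent")), ("-userAgent",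 (4, "-target__vector_email__result_event__userAgent")), ("ip", (3, "target__vector_email__result_event__ip")), ("-ip", (4, "-target__vector_email__result_event__ip")), ("login", (3, "target__vector_email__result_event__login")), ("-login", (4, "-target__vector_email__result_event__login")), ("password", (3, "target__vector_email__result_event__password")), ("-password", (4, "-target__vector_email__result_event__password")), ("raw_data", (3, "target__vector_email__result_event__raw_data")), ("-raw_data", (4, "-target__vector_email__result_event__raw_data"))] := by decide
  simp [pvStep, hmk, PySem.Dict.get?, pvH0, pvH1, pvH2, pvH3, pvH4, Ne.symm h0, Ne.symm h1, Ne.symm h2, Ne.symm h3, Ne.symm h4, Ne.symm h5, Ne.symm h6, Ne.symm h7, Ne.symm h8, Ne.symm h9, Ne.symm h10, Ne.symm h11, Ne.symm h12, Ne.symm h13, Ne.symm h14, Ne.symm h15, Ne.symm h16, Ne.symm h17, Ne.symm h18, Ne.symm h19, Ne.symm h20, Ne.symm h21, h0, h1, h2, h3, h4, h5, h6, h7, h8, h9, h10, h11, h12, h13, h14, h15, h16, h17, h18, h19, h20, h21]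

lemma pvLoop_inv (ts : List String) (b : pvBuckets) :
    ts.foldl pvStep b =
      (b.1 ++ ts.flatMap pvH0, b.2.1 ++ ts.flatMap pvH1, b.2.2.1 ++ ts.flatMap pvH2,
       b.2.2.2.1 ++ ts.flatMap pvH3, b.2.2.2.2 ++ ts.flatMap pvH4) := by
  induction ts generalizing b with
  | nil => simp
  | cons t ts ih =>
      simp only [List.foldl_cons, pvStep_eq, ih, List.flatMap_cons, List.append_assoc]

lemma pvFlat0 (ts : List String) :
    ts.flatMap pvH0 = ts.filter (fun i => (["nickname", "-nickname"] : List String).contains i) := by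
  induction ts with
  | nil => rfl
  | cons t ts ih =>
      simp [pvH0, List.filter_cons, ih]
      split <;> simp

lemma pvFlat1 (ts : List String) :
    ts.flatMap pvH1 = (ts.filter (fun i => (["email", "firstname", "lastname"] : List String).contains i)).map
      (fun i => PySem.Str.join "" ["target__", i]) := by
  induction ts with
  | nil => rfl
  | cons t ts ih =>
      simp [pvH1, List.filter_cons, ih]
      split <;> simp

lemma pvFlat2 (ts : List String) :
    ts.flatMap pvH2 = (ts.filter (fun i => (["-email", "-firstname", "-lastname"] : List String).contains i)).map
      (fun i => PySem.Str.join "" ["-target__", PySem.Str.slice i (some 1) none]) := by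
  induction ts with
  | nil => rfl
  | cons t ts ih =>
      simp [pvH2, List.filter_cons, ih]
      split <;> simp

lemma pvFlat3 (ts : List String) :
    ts.flatMap pvH3 = (ts.filter (fun i =>
        (["event_type", "timestamp", "userAgent", "ip", "login", "password", "raw_data"] : List String).contains i)).map
      (fun i => PySem.Str.join "" ["target__vector_email__result_event__", i]) := by
  induction ts with
  | nil => rfl
  | cons t ts ih =>
      simp [pvH3, List.filter_cons, ih]
      split <;> simp

lemma pvFlat4 (ts : List String) :
    ts.flatMap pvH4 = (ts.filter (fun i =>
        (["-event_type", "-timestamp", "-userAgent", "-ip", "-login", "-password", "-raw_data"] : List String).contains i)).map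
      (fun i => PySem.Str.join "" ["-target__vector_email__result_event__", PySem.Str.slice i (some 1) none]) := by
  induction ts with
  | nil => rfl
  | cons t ts ih =>
      simp [pvH4, List.filter_cons, ih]
      split <;> simp

-- A's guarded extends collapse to one five-way concatenation (appending [] is the identity)
lemma pvChain (l0 l1 l2 l3 l4 : List String) :
    (if l4 ≠ [] then
      (if l3 ≠ [] then
        (if l2 ≠ [] then (if l1 ≠ [] then l0 ++ l1 else l0) ++ l2
         else if l1 ≠ [] then l0 ++ l1 else l0) ++ l3
       else if l2 ≠ [] then (if l1 ≠ [] then l0 ++ l1 else l0) ++ l2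
            else if l1 ≠ [] then l0 ++ l1 else l0) ++ l4
     else
       if l3 ≠ [] then
        (if l2 ≠ [] then (if l1 ≠ [] then l0 ++ l1 else l0) ++ l2
         else if l1 ≠ [] then l0 ++ l1 else l0) ++ l3
       else if l2 ≠ [] then (if l1 ≠ [] then l0 ++ l1 else l0) ++ l2
            else if l1 ≠ [] then l0 ++ l1 else l0)
    = l0 ++ (l1 ++ (l2 ++ (l3 ++ l4))) := by
  split_ifs <;> simp_all [List.append_assoc]

-- ===== VERDICT (by name: the statement is the Claim_ definition above) =====
theorem convert_target_list_order_by_fields_py_spec : Claim_equal_convert_target_list_order_by_fields_py := by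
  intro order_by _
  unfold Spec_convert_target_list_order_by_fields_py
  unfold convert_target_list_order_by_fields_py convert_target_list_order_by_fields_py_alt
  simp only [pvLoop_inv, pvFlat0, pvFlat1, pvFlat2, pvFlat3, pvFlat4, List.nil_append]
  rw [pvChain]
  simp [List.append_assoc]
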